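-- pv_equiv track=rewrite | github.com/ERATOMMSD/dynamic-shielding | python/benchmarks/grid_world/grid_world_specifications.py | no_crash_duration
-- ===== SOURCE A (Python) =====
-- from typing import List
--
-- def no_crash_duration(duration: int) -> str:
--     """
--     Args:
--         duration: int : the duration with no crash. We assume that duration is positive.
--     """
--     if duration <= 0:
--         raise IndexError(f'duration must be positive (duration: {duration})')
--
--     def add_next(original_formula: str) -> str:
--         return f'X({original_formula})'
--
--     formulas: List[str] = []
--     for i in range(duration):
--         formula = 'CrashPositions.NO_CRASH'
--         for j in range(i):
--             formula = add_next(formula)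
--         formulas.append(f'({formula})')
--     return ' & '.join(formulas)
-- ===== SOURCE B (Python) =====
-- def no_crash_duration(duration: int) -> str:
--     """Incremental version: each formula is X(previous) instead of being rebuilt from the base."""
--     if duration <= 0:
--         raise IndexError(f'duration must be positive (duration: {duration})')
--     formula = 'CrashPositions.NO_CRASH'
--     parts = []
--     for _ in range(duration):
--         parts.append(f'({formula})')
--         formula = f'X({formula})'
--     return ' & '.join(parts)
-- ===== Notes on version B (the rewrite author's own statement) =====
-- stated objective: faster
-- what changed: B carries the current formula across the loop and wraps it in one X(...) per step, instead of A's inner loop that rebuilds each formula from the base, removing the quadratic number of wrap operations.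
-- outside the precondition, e.g. on no_crash_duration(0): A raises IndexError, B raises IndexError
import Mathlib
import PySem

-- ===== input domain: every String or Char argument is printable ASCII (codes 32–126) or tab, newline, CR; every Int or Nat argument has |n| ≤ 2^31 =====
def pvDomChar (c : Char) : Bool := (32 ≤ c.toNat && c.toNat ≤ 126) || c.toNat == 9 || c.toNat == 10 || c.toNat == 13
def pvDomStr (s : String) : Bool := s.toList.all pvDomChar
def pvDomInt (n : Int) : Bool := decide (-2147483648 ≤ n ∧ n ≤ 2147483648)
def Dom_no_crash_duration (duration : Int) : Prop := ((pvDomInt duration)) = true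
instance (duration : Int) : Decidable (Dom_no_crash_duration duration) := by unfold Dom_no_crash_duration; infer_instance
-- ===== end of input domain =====

-- B builds each conjunct incrementally as X(previous) instead of rebuilding it from the base each
-- iteration (faster: linearly many wrap operations instead of quadratically many).


-- ===== PORT A =====
-- helper add_next: f'X({original_formula})'  (strings handled on the List Char side, exact for these ASCII literals)
def pvAddNext (f : List Char) : List Char := "X(".toList ++ f ++ ")".toList

def no_crash_duration (duration : Int) : String :=
  -- 'if duration <= 0: raise IndexError' is excluded by Pre_
  let formulas : List (List Char) :=
    (PySem.List.pyRange 0 duration 1).foldl (fun acc i =>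
      let formula :=
        (PySem.List.pyRange 0 i 1).foldl (fun f _ => pvAddNext f)
          "CrashPositions.NO_CRASH".toList
      acc ++ ["(".toList ++ formula ++ ")".toList]) []
  String.ofList (PySem.Chars.join " & ".toList formulas)

-- ===== PORT B =====
def no_crash_duration_alt (duration : Int) : String :=
  -- 'if duration <= 0: raise IndexError' is excluded by Pre_
  let st :=
    (PySem.List.pyRange 0 duration 1).foldl
      (fun (st : List (List Char) × List Char) _ =>
        (st.1 ++ ["(".toList ++ st.2 ++ ")".toList], "X(".toList ++ st.2 ++ ")".toList))
      ([], "CrashPositions.NO_CRASH".toList)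
  String.ofList (PySem.Chars.join " & ".toList st.1)

-- ===== PRECONDITION & SPEC =====
-- Pre_: A raises IndexError on duration <= 0 (and so does B).
def Pre_no_crash_duration (duration : Int) : Prop := 0 < duration
instance (duration : Int) : Decidable (Pre_no_crash_duration duration) := by unfold Pre_no_crash_duration; infer_instance
def pvWitness_no_crash_duration : Int := (3)

def Spec_no_crash_duration (duration : Int) (out : String) : Prop := out = no_crash_duration_alt duration
instance (duration : Int) (out : String) : Decidable (Spec_no_crash_duration duration out) := by unfold Spec_no_crash_duration; infer_instance

-- ===== CLAIM (what is proved, stated in full; the proofs are below) =====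
def Claim_equal_no_crash_duration : Prop := ∀ (duration : Int), Dom_no_crash_duration duration → Pre_no_crash_duration duration → Spec_no_crash_duration duration (no_crash_duration duration)

-- ===== LEMMAS AND PROOFS =====

-- a fold that ignores its elements is an iterate
theorem pv_foldl_ignore_iterate {α β : Type} (g : α → α) (l : List β) (init : α) :
    l.foldl (fun f _ => g f) init = g^[l.length] init := by
  induction l generalizing init with
  | nil => rfl
  | cons x t ih => simp [List.foldl, ih, Function.iterate_succ_apply]

-- A's i-th conjunct (before the outer parentheses)
def pvIter (k : Nat) : List Char := pvAddNext^[k] "CrashPositions.NO_CRASH".toList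

theorem pvA_formulas (n : Nat) :
    (PySem.List.pyRange 0 (n : Int) 1).foldl (fun acc i =>
        acc ++ ["(".toList ++
          (PySem.List.pyRange 0 i 1).foldl (fun f _ => pvAddNext f)
            "CrashPositions.NO_CRASH".toList ++ ")".toList]) [] =
      (List.range n).map (fun k => "(".toList ++ pvIter k ++ ")".toList) := by
  rw [PySem.List.pyRange_one, List.foldl_map,
    PySem.List.foldl_append_singleton_eq_map]
  simp only [List.nil_append]
  refine List.map_congr_left (fun k hk => ?_)
  rw [pv_foldl_ignore_iterate, pvIter]
  congr 2
  simp [PySem.List.length_pyRange_one]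

theorem pvB_state (n : Nat) :
    (PySem.List.pyRange 0 (n : Int) 1).foldl
        (fun (st : List (List Char) × List Char) _ =>
          (st.1 ++ ["(".toList ++ st.2 ++ ")".toList], "X(".toList ++ st.2 ++ ")".toList))
        ([], "CrashPositions.NO_CRASH".toList) =
      ((List.range n).map (fun k => "(".toList ++ pvIter k ++ ")".toList), pvIter n) := by
  induction n with
  | zero => rfl
  | succ m ih =>
    have h : ((m : Int) : Int) ≤ ((m : Int) + 1) := by omega
    have hr : PySem.List.pyRange 0 ((m + 1 : Nat) : Int) 1 =
        PySem.List.pyRange 0 (m : Int) 1 ++ [(m : Int)] := by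
      push_cast
      exact PySem.List.pyRange_one_succ_right (by omega)
    rw [hr, List.foldl_append, ih]
    simp [List.range_succ, pvIter, Function.iterate_succ_apply', pvAddNext]

-- ===== VERDICT (by name: the statement is the Claim_ definition above) =====
theorem no_crash_duration_spec : Claim_equal_no_crash_duration := by
  intro d _ hp
  replace hp : 0 < d := hp
  have hd : d = ((d.toNat : Nat) : Int) := by omega
  unfold Spec_no_crash_duration no_crash_duration no_crash_duration_alt
  rw [hd, pvA_formulas, pvB_state]
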